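-- pv_equiv track=rewrite | github.com/sntek/calvn | backend/src/oracle/setup.py | _pick_alias
-- ===== SOURCE A (Python) =====
-- def _pick_alias(preferred: str, available: list[str]) -> str | None:
--     if preferred in available:
--         return preferred
--     pref_lower = preferred.lower()
--     for length in range(len(pref_lower), 2, -1):
--         for start in range(len(pref_lower) - length + 1):
--             chunk = pref_lower[start : start + length]
--             for cand in available:
--                 if chunk in cand.lower():
--                     return cand
--     for cand in available:
--         if cand.lower().endswith("_low"):
--             return cand
--     return available[0] if available else None
-- ===== SOURCE B (Python) =====
-- def _pick_alias(preferred: str, available: list[str]) -> str | None: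
--     if preferred in available:
--         return preferred
--     p = preferred.lower()
--     lows = [c.lower() for c in available]
--
--     def has(L):
--         return any(p[s:s + L] in c for s in range(len(p) - L + 1) for c in lows)
--
--     if len(p) >= 3 and has(3):
--         # binary search the largest matching chunk length (matching is monotone),
--         # then reproduce the tie-break scan at that single length
--         lo, hi = 3, len(p)
--         while lo < hi:
--             mid = (lo + hi + 1) // 2
--             if has(mid):
--                 lo = mid
--             else:
--                 hi = mid - 1
--         for start in range(len(p) - lo + 1):
--             chunk = p[start:start + lo]
--             for cand in available:
--                 if chunk in cand.lower():
--                     return cand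
--     for cand in available:
--         if cand.lower().endswith("_low"):
--             return cand
--     return available[0] if available else None
-- ===== Notes on version B (the rewrite author's own statement) =====
-- stated objective: faster
-- what changed: Instead of scanning every chunk length from len(preferred) down to 3, B binary-searches the largest matching chunk length (matchability is monotone in the length) over precomputed lowercased candidates and then reproduces A's tie-break scan at that single length.
import Mathlib
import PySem

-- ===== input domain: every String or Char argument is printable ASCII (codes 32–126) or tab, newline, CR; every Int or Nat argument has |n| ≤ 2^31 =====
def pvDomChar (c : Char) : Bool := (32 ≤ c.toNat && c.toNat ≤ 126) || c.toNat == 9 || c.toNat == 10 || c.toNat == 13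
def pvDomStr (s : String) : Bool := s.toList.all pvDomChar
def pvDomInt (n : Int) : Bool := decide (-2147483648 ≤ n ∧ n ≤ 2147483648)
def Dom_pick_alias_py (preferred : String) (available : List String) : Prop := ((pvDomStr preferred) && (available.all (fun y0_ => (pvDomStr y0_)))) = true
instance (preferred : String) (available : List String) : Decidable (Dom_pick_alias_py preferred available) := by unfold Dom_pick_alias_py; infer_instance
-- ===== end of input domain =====

-- B changes the length search of A into a binary search for the largest matching
-- chunk length (an O(log m)-probe search instead of trying every length), keeping
-- A's tie-break scan at that single length; equivalence is proved on all inputs.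

-- shared porting convention for Python's early `return` inside a for-loop:
-- the accumulator keeps an already-returned value, otherwise the body runs
def pvStep {α β : Type} (g : α → Option β) : Option β → α → Option β :=
  fun acc x => match acc with | some v => some v | none => g x

-- ===== PORT A =====
def pick_alias_py (preferred : String) (available : List String) : Option String :=
  if available.contains preferred then some preferred
  else
    let pref_lower := PySem.Str.lower preferred
    let r1 : Option String :=
      (PySem.List.pyRange (PySem.Str.len pref_lower) 2 (-1)).foldl (pvStep (fun length =>
        (PySem.List.pyRange 0 (PySem.Str.len pref_lower - length + 1) 1).foldl (pvStep (fun start =>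
          available.foldl (pvStep (fun cand =>
            if PySem.Str.isIn (PySem.Str.slice pref_lower (some start) (some (start + length))) (PySem.Str.lower cand) then some cand
            else none)) none)) none)) none
    match r1 with
    | some v => some v
    | none =>
      match available.foldl (pvStep (fun cand =>
          if PySem.Str.endswith (PySem.Str.lower cand) "_low" then some cand else none)) none with
      | some v => some v
      | none => available.head?

-- ===== PORT B =====
-- helper of B: the inner function `has(L)` of Source B
def pvHas (p : String) (lows : List String) (L : Int) : Bool :=
  (PySem.List.pyRange 0 (PySem.Str.len p - L + 1) 1).any (fun s =>
    lows.any (fun c => PySem.Str.isIn (PySem.Str.slice p (some s) (some (s + L))) c))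

-- helper of B: the `while lo < hi` binary-search loop of Source B
def pvBSearch (has : Nat → Bool) (lo hi : Nat) : Nat :=
  if lo < hi then
    if has ((lo + hi + 1) / 2) then pvBSearch has ((lo + hi + 1) / 2) hi
    else pvBSearch has lo ((lo + hi + 1) / 2 - 1)
  else lo
termination_by hi - lo
decreasing_by all_goals omega

def pick_alias_py_alt (preferred : String) (available : List String) : Option String :=
  if available.contains preferred then some preferred
  else
    let p := PySem.Str.lower preferred
    let lows := available.map PySem.Str.lower
    let main : Option String :=
      if 3 ≤ PySem.Str.len p then
        if pvHas p lows 3 then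
          let best : Int := (pvBSearch (fun k => pvHas p lows (k : Int)) 3 (PySem.Str.len p).toNat : Nat)
          (PySem.List.pyRange 0 (PySem.Str.len p - best + 1) 1).foldl (pvStep (fun start =>
            available.foldl (pvStep (fun cand =>
              if PySem.Str.isIn (PySem.Str.slice p (some start) (some (start + best))) (PySem.Str.lower cand) then some cand
              else none)) none)) none
        else none
      else none
    match main with
    | some v => some v
    | none =>
      match available.foldl (pvStep (fun cand =>
          if PySem.Str.endswith (PySem.Str.lower cand) "_low" then some cand else none)) none with
      | some v => some v
      | none => available.head?

-- ===== PRECONDITION & SPEC =====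
def Spec_pick_alias_py (preferred : String) (available : List String) (out : Option String) : Prop := out = pick_alias_py_alt preferred available
instance (preferred : String) (available : List String) (out : Option String) : Decidable (Spec_pick_alias_py preferred available out) := by unfold Spec_pick_alias_py; infer_instance

-- ===== CLAIM (what is proved, stated in full; the proofs are below) =====
def Claim_equal_pick_alias_py : Prop := ∀ (preferred : String) (available : List String), Dom_pick_alias_py preferred available → Spec_pick_alias_py preferred available (pick_alias_py preferred available)

-- ===== LEMMAS AND PROOFS =====

-- A's (and B's) scan at one chunk length, as the first hit of the start/candidate loops
def pvScan (p : String) (available : List String) (L : Int) : Option String :=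
  (PySem.List.pyRange 0 (PySem.Str.len p - L + 1) 1).findSome? (fun start =>
    available.findSome? (fun cand =>
      if PySem.Str.isIn (PySem.Str.slice p (some start) (some (start + L))) (PySem.Str.lower cand) then some cand
      else none))

lemma pvFoldlSome {α β : Type} (g : α → Option β) (l : List α) (v : β) :
    l.foldl (pvStep g) (some v) = some v := by
  induction l with
  | nil => rfl
  | cons a t ih => simpa [pvStep] using ih

lemma pvFoldlFirst {α β : Type} (g : α → Option β) (l : List α) :
    l.foldl (pvStep g) none = l.findSome? g := by
  induction l with
  | nil => rfl
  | cons a t ih =>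
    simp only [List.foldl_cons, List.findSome?_cons, pvStep]
    cases h : g a with
    | none => simpa [h] using ih
    | some v => simp [pvFoldlSome]

lemma pvIsSomeEqFalse {β : Type} {o : Option β} (h : o.isSome = false) : o = none := by
  cases o <;> simp_all

lemma pvIsSomeIte {α : Type} (b : Bool) (x : α) :
    (if b = true then some x else none).isSome = b := by
  cases b <;> simp

lemma pvScan_isSome (p : String) (available : List String) (L : Int) :
    (pvScan p available L).isSome = pvHas p (available.map PySem.Str.lower) L := by
  simp only [pvScan, pvHas, List.isSome_findSome?, List.any_map, Function.comp_def, pvIsSomeIte]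

lemma pvLen_nonneg (p : String) : 0 ≤ PySem.Str.len p := by
  simp [PySem.Str.len_eq]

lemma pvHas_mono (p : String) (lows : List String) {L L' : Int}
    (h0 : 0 ≤ L') (hLL : L' ≤ L) (h : pvHas p lows L = true) : pvHas p lows L' = true := by
  simp only [pvHas, List.any_eq_true] at h ⊢
  obtain ⟨s, hs, c, hc, hIn⟩ := h
  rw [PySem.List.mem_pyRange_iff_of_pos (by norm_num)] at hs
  obtain ⟨hs0, hsub, -⟩ := hs
  refine ⟨s, ?_, c, hc, ?_⟩
  · rw [PySem.List.mem_pyRange_iff_of_pos (by norm_num)]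
    exact ⟨hs0, by omega, by simp⟩
  · rw [PySem.Str.isIn_iff_infix] at hIn ⊢
    rw [PySem.Str.toList_slice, PySem.Chars.slice_eq_listSlice] at hIn ⊢
    rw [PySem.List.slice_toNat p.toList hs0 (by omega : (0:Int) ≤ s + L)] at hIn
    rw [PySem.List.slice_toNat p.toList hs0 (by omega : (0:Int) ≤ s + L')]
    have hL : (s + L).toNat - s.toNat = L.toNat := by omega
    have hL' : (s + L').toNat - s.toNat = L'.toNat := by omega
    rw [hL] at hIn
    rw [hL']
    refine List.IsInfix.trans ?_ hIn
    have heq : List.take L'.toNat (List.drop s.toNat p.toList)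
        = List.take L'.toNat (List.take L.toNat (List.drop s.toNat p.toList)) := by
      rw [List.take_take, Nat.min_eq_left (by omega)]
    rw [heq]
    exact (List.take_prefix _ _).isInfix

lemma pvBSearch_spec (has : Nat → Bool) (lo hi : Nat) :
    lo ≤ hi → has lo = true →
    lo ≤ pvBSearch has lo hi ∧ pvBSearch has lo hi ≤ hi ∧ has (pvBSearch has lo hi) = true ∧
      (pvBSearch has lo hi < hi → has (pvBSearch has lo hi + 1) = false) := by
  induction lo, hi using pvBSearch.induct (has := has) with
  | case1 lo hi hlt hmid ih =>
    intro _ _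
    rw [pvBSearch, if_pos hlt, if_pos hmid]
    obtain ⟨h1, h2, h3, h4⟩ := ih (by omega) hmid
    exact ⟨by omega, h2, h3, h4⟩
  | case2 lo hi hlt hmid ih =>
    intro _ hlo
    simp only [Bool.not_eq_true] at hmid
    rw [pvBSearch, if_pos hlt, if_neg (by simp [hmid])]
    obtain ⟨h1, h2, h3, h4⟩ := ih (by omega) hlo
    refine ⟨h1, by omega, h3, fun _ => ?_⟩
    by_cases hcase : pvBSearch has lo ((lo + hi + 1) / 2 - 1) < (lo + hi + 1) / 2 - 1
    · exact h4 hcase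
    · have heq : pvBSearch has lo ((lo + hi + 1) / 2 - 1) + 1 = (lo + hi + 1) / 2 := by omega
      rw [heq]; exact hmid
  | case3 lo hi hlt =>
    intro hle hlo
    rw [pvBSearch, if_neg hlt]
    exact ⟨le_refl _, hle, hlo, by omega⟩

-- the three nested early-exit loops of A, reduced to findSome? over pvScan
lemma pvA_loop_eq (p : String) (available : List String) :
    ((PySem.List.pyRange (PySem.Str.len p) 2 (-1)).foldl (pvStep (fun length =>
        (PySem.List.pyRange 0 (PySem.Str.len p - length + 1) 1).foldl (pvStep (fun start =>
          available.foldl (pvStep (fun cand =>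
            if PySem.Str.isIn (PySem.Str.slice p (some start) (some (start + length))) (PySem.Str.lower cand) then some cand
            else none)) none)) none)) none)
      = (PySem.List.pyRange (PySem.Str.len p) 2 (-1)).findSome? (pvScan p available) := by
  simp only [pvFoldlFirst]
  rfl

-- if no length ≥ 3 matches at all, A's length loop yields nothing
lemma pvNoMatch (p : String) (available : List String)
    (h3 : ¬ pvHas p (available.map PySem.Str.lower) 3 = true) :
    (PySem.List.pyRange (PySem.Str.len p) 2 (-1)).findSome? (pvScan p available) = none := by
  rw [List.findSome?_eq_none_iff]
  intro L hL
  rw [PySem.List.pyRange_neg_one] at hL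
  simp only [List.mem_map, List.mem_range] at hL
  obtain ⟨k, hk, rfl⟩ := hL
  apply pvIsSomeEqFalse
  cases hcase : pvHas p (available.map PySem.Str.lower) (PySem.Str.len p - (k : Int)) with
  | false => rw [pvScan_isSome]; exact hcase
  | true =>
    exact absurd (pvHas_mono p _ (by norm_num) (by omega) hcase) h3

-- if some length ≥ 3 matches, A's length loop collapses to the largest matching length
lemma pvCollapse (p : String) (available : List String)
    (hn3 : 3 ≤ PySem.Str.len p)
    (h3 : pvHas p (available.map PySem.Str.lower) 3 = true) :
    (PySem.List.pyRange (PySem.Str.len p) 2 (-1)).findSome? (pvScan p available)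
      = pvScan p available
          ((pvBSearch (fun k => pvHas p (available.map PySem.Str.lower) (k : Int)) 3 (PySem.Str.len p).toNat : Nat) : Int) := by
  have hn0 : 0 ≤ PySem.Str.len p := pvLen_nonneg p
  obtain ⟨hb1, hb2, hb3, hb4⟩ :=
    pvBSearch_spec (fun k => pvHas p (available.map PySem.Str.lower) (k : Int)) 3
      (PySem.Str.len p).toNat (by omega) (by simpa using h3)
  generalize hbestE : pvBSearch (fun k => pvHas p (available.map PySem.Str.lower) (k : Int)) 3
      (PySem.Str.len p).toNat = best at hb1 hb2 hb3 hb4 ⊢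
  have hT : (PySem.Str.len p - 2).toNat = ((PySem.Str.len p).toNat - best) + (best - 2) := by omega
  rw [PySem.List.pyRange_neg_one, hT, List.range_add, List.map_append, List.findSome?_append]
  have hnone : (((List.range ((PySem.Str.len p).toNat - best)).map
        (fun (k : Nat) => PySem.Str.len p - (k : Int))).findSome? (pvScan p available)) = none := by
    rw [List.findSome?_eq_none_iff]
    intro L hL
    simp only [List.mem_map, List.mem_range] at hL
    obtain ⟨k, hk, rfl⟩ := hL
    apply pvIsSomeEqFalse
    cases hcase : pvHas p (available.map PySem.Str.lower) (PySem.Str.len p - (k : Int)) with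
    | false => rw [pvScan_isSome]; exact hcase
    | true =>
      exfalso
      have hbn : best < (PySem.Str.len p).toNat := by omega
      have hup : pvHas p (available.map PySem.Str.lower) ((best : Int) + 1) = true :=
        pvHas_mono p _ (by omega) (by omega) hcase
      have hf := hb4 hbn
      push_cast at hf
      rw [hup] at hf
      simp at hf
  rw [hnone, Option.none_or, List.map_map]
  have hbe : best - 2 = (best - 3) + 1 := by omega
  rw [hbe, List.range_succ_eq_map, List.map_cons, List.findSome?_cons]
  simp only [Function.comp_apply]
  have harg : PySem.Str.len p - (((PySem.Str.len p).toNat - best + 0 : Nat) : Int) = (best : Int) := by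
    omega
  rw [harg]
  have hsome : (pvScan p available (best : Int)).isSome = true := by
    rw [pvScan_isSome]; exact hb3
  obtain ⟨v, hv⟩ := Option.isSome_iff_exists.mp hsome
  rw [hv]

lemma pvMain : ∀ (preferred : String) (available : List String),
    pick_alias_py preferred available = pick_alias_py_alt preferred available := by
  intro preferred available
  by_cases hc : available.contains preferred = true
  · simp only [pick_alias_py, pick_alias_py_alt, if_pos hc]
  · simp only [pick_alias_py, pick_alias_py_alt, if_neg hc]
    rw [pvA_loop_eq (PySem.Str.lower preferred) available]
    by_cases hn3 : 3 ≤ PySem.Str.len (PySem.Str.lower preferred)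
    · by_cases h3 : pvHas (PySem.Str.lower preferred) (available.map PySem.Str.lower) 3 = true
      · rw [if_pos hn3, if_pos h3, pvCollapse (PySem.Str.lower preferred) available hn3 h3, pvScan]
        simp only [← pvFoldlFirst]
      · rw [if_pos hn3, if_neg h3, pvNoMatch (PySem.Str.lower preferred) available h3]
    · rw [if_neg hn3, pvNoMatch (PySem.Str.lower preferred) available ?hno]
      case hno =>
        intro hcon
        have := pvLen_nonneg (PySem.Str.lower preferred)
        simp only [pvHas] at hcon
        rcases List.any_eq_true.mp hcon with ⟨s, hs, -⟩
        rw [PySem.List.mem_pyRange_iff_of_pos (by norm_num)] at hs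
        omega

-- ===== VERDICT (by name: the statement is the Claim_ definition above) =====
theorem pick_alias_py_spec : Claim_equal_pick_alias_py := by
  intro preferred available _
  unfold Spec_pick_alias_py
  exact pvMain preferred available
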